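-- pv_equiv track=rewrite | github.com/code4aLiving/data_structures_algorithms | Excercises/lucky_number_8.py | oneDigitTable
-- ===== SOURCE A (Python) =====
-- def oneDigitTable(digits):
--     table = [[0 for x in range(10)] for x in range(len(digits))]
--     for i in range(len(digits)):
--         for j in range(10):
--             if j != digits[i]:
--                 if i>0:
--                     table[i][j] = table[i-1][j]
--             else:
--                 if not i:
--                     table[i][j]=1
--                 else:
--                     table[i][j]=table[i-1][j] + 2**i
--
--     return table
-- ===== SOURCE B (Python) =====
-- def oneDigitTable(digits):
--     masks = [0] * 10
--     bit = 1
--     for d in digits: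
--         if d in range(10):
--             masks[d] += bit
--         bit <<= 1
--     table = []
--     low = 1
--     for _ in digits:
--         table.append([m & low for m in masks])
--         low = 2 * low + 1
--     return table
-- ===== Notes on version B (the rewrite author's own statement) =====
-- stated objective: alternative
-- what changed: Instead of A's row-by-row DP (each row derived cell by cell from the previous row), B first builds in one pass a single final bit-weight per digit column (masks[d] accrues 2**k at each position k with digits[k]==d) and then derives every row i independently as masks[j] & (2**(i+1)-1), i.e. each row is a bitwise truncation of the final column weights rather than a DP successor of the previous row.
import Mathlib
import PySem

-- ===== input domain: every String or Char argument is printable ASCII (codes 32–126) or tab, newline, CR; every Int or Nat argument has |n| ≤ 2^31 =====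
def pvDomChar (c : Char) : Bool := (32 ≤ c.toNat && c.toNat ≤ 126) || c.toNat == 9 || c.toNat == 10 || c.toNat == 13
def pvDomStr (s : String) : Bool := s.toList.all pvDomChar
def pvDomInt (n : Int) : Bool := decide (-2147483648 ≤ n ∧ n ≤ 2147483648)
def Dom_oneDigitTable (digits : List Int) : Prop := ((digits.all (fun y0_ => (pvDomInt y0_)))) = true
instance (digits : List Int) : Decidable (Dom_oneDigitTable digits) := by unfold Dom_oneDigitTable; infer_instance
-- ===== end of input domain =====

-- B replaces A's row-by-row DP by a staged algorithm: one pass accumulates a final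
-- weight per digit column, then each row is that weight truncated mod 2^(i+1); objective: alternative.

-- ===== PORT A =====
-- table[i][j] read/write helpers (indices produced by range() are always ≥ 0 and in range here,
-- so reads are exact; pyGet? follows Python indexing)
def pvGet2 (tb : List (List Int)) (i j : Int) : Int :=
  (PySem.List.pyGet? ((PySem.List.pyGet? tb i).getD []) j).getD 0

def pvSet2 (tb : List (List Int)) (i j : Int) (v : Int) : List (List Int) :=
  tb.set i.toNat (((PySem.List.pyGet? tb i).getD []).set j.toNat v)

-- body of the inner 'for j in range(10)' loop, transliterated branch for branch
def pvInnerBody (digits : List Int) (i : Int) (tb : List (List Int)) (j : Int) : List (List Int) :=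
  if j ≠ (PySem.List.pyGet? digits i).getD 0 then
    if i > 0 then pvSet2 tb i j (pvGet2 tb (i-1) j) else tb
  else
    if i = 0 then pvSet2 tb i j 1
    else pvSet2 tb i j (pvGet2 tb (i-1) j + 2 ^ i.toNat)

def oneDigitTable (digits : List Int) : List (List Int) :=
  let table := (PySem.List.pyRange 0 (digits.length : Int) 1).map
      (fun _ => (PySem.List.pyRange 0 10 1).map (fun _ => (0:Int)))
  (PySem.List.pyRange 0 (digits.length : Int) 1).foldl
    (fun tb i => (PySem.List.pyRange 0 10 1).foldl (pvInnerBody digits i) tb) table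

-- ===== PORT B =====
-- first loop of Source B: 'if d in range(10): masks[d] += bit' then 'bit <<= 1'
def pvMaskStep (st : List Int × Int) (d : Int) : List Int × Int :=
  ((if 0 ≤ d ∧ d < 10 then
      st.1.set d.toNat (((PySem.List.pyGet? st.1 d).getD 0) + st.2)
    else st.1),
   st.2 <<< (1:Nat))

-- second loop of Source B: append '[m & low for m in masks]' then 'low = 2 * low + 1'
def pvRowStep (masks : List Int) (st : List (List Int) × Int) (_d : Int) : List (List Int) × Int :=
  (st.1 ++ [masks.map (fun m => PySem.Int.band m st.2)], 2 * st.2 + 1)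

def oneDigitTable_alt (digits : List Int) : List (List Int) :=
  let masks := (digits.foldl pvMaskStep (List.replicate 10 0, 1)).1
  (digits.foldl (pvRowStep masks) ([], 1)).1

-- ===== PRECONDITION & SPEC =====
def Spec_oneDigitTable (digits : List Int) (out : List (List Int)) : Prop := out = oneDigitTable_alt digits
instance (digits : List Int) (out : List (List Int)) : Decidable (Spec_oneDigitTable digits out) := by unfold Spec_oneDigitTable; infer_instance

-- ===== CLAIM (what is proved, stated in full; the proofs are below) =====
def Claim_equal_oneDigitTable : Prop := ∀ (digits : List Int), Dom_oneDigitTable digits → Spec_oneDigitTable digits (oneDigitTable digits)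

-- ===== LEMMAS AND PROOFS =====

-- proof-side accumulator: the column weights after the first m positions
def pvStepRow (cur : List Int) (d : Int) (i : Nat) : List Int :=
  if 0 ≤ d ∧ d < 10 then cur.set d.toNat (((PySem.List.pyGet? cur d).getD 0) + 2 ^ i) else cur

def pvCurAt (digits : List Int) : Nat → List Int
  | 0 => List.replicate 10 0
  | m+1 => pvStepRow (pvCurAt digits m) ((PySem.List.pyGet? digits (m : Int)).getD 0) m

-- row-level version of the inner body: what pvInnerBody does to row i, reading row i-1 = prev
def pvG (prev : List Int) (i : Int) (d : Int) (row : List Int) (j : Int) : List Int :=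
  if j ≠ d then
    if i > 0 then row.set j.toNat ((PySem.List.pyGet? prev j).getD 0) else row
  else
    if i = 0 then row.set j.toNat 1
    else row.set j.toNat ((PySem.List.pyGet? prev j).getD 0 + 2 ^ i.toNat)

-- the j-th entry of the accumulator (0-padded outside)
def pvE (digits : List Int) (m j : Nat) : Int := ((pvCurAt digits m)[j]?).getD 0

lemma pvStepRow_length (cur : List Int) (d : Int) (i : Nat) :
    (pvStepRow cur d i).length = cur.length := by
  unfold pvStepRow; split_ifs <;> simp

lemma pvCurAt_length (digits : List Int) (m : Nat) : (pvCurAt digits m).length = 10 := by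
  induction m with
  | zero => simp [pvCurAt]
  | succ m ih => simp [pvCurAt, pvStepRow_length, ih]

-- G ignores prev when i = 0
lemma pvG_zero_irrel (p q : List Int) (d : Int) :
    pvG p 0 d = pvG q 0 d := by
  funext row j; unfold pvG; split_ifs <;> simp_all

-- lifting: the inner fold only writes row i and reads row i-1
lemma pvLift (digits : List Int) (l : List Int) (tb : List (List Int))
    (i : Nat) (hi : i < tb.length) :
    l.foldl (pvInnerBody digits (i : Int)) tb
      = tb.set i (l.foldl (pvG ((PySem.List.pyGet? tb ((i:Int)-1)).getD []) (i:Int) ((PySem.List.pyGet? digits (i:Int)).getD 0)) tb[i]) := by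
  induction l generalizing tb with
  | nil => simp [List.foldl]
  | cons j l ih =>
      have hrd : PySem.List.pyGet? tb (i : Int) = some tb[i] := by
        rw [PySem.List.pyGet?_natCast]; simp [hi]
      -- one inner-loop step rewrites only row i
      have hstep : pvInnerBody digits (i : Int) tb j
          = tb.set i (pvG ((PySem.List.pyGet? tb ((i:Int)-1)).getD []) (i:Int)
              ((PySem.List.pyGet? digits (i:Int)).getD 0) tb[i] j) := by
        unfold pvInnerBody pvG pvSet2 pvGet2
        by_cases h0 : i = 0
        · subst h0
          simp only [Nat.cast_zero] at hrd ⊢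
          simp [hrd]
          split_ifs <;> simp [List.set_getElem_self hi]
        · have hz : ¬((i:Int) = 0) := by omega
          have hp : (0:Int) < (i:Int) := by omega
          simp [hrd, h0]
          split_ifs <;> first | rfl | omega
      set tb' := tb.set i (pvG ((PySem.List.pyGet? tb ((i:Int)-1)).getD []) (i:Int)
          ((PySem.List.pyGet? digits (i:Int)).getD 0) tb[i] j) with htb'
      have hlen' : i < tb'.length := by simpa [htb'] using hi
      have hrow' : tb'[i] = pvG ((PySem.List.pyGet? tb ((i:Int)-1)).getD []) (i:Int)
          ((PySem.List.pyGet? digits (i:Int)).getD 0) tb[i] j := by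
        simp [htb']
      have hGeq : pvG ((PySem.List.pyGet? tb' ((i:Int)-1)).getD []) (i:Int)
            ((PySem.List.pyGet? digits (i:Int)).getD 0)
          = pvG ((PySem.List.pyGet? tb ((i:Int)-1)).getD []) (i:Int)
            ((PySem.List.pyGet? digits (i:Int)).getD 0) := by
        by_cases hz : i = 0
        · subst hz; exact pvG_zero_irrel _ _ _
        · have : PySem.List.pyGet? tb' ((i:Int)-1) = PySem.List.pyGet? tb ((i:Int)-1) := by
            have h1 : ((i:Int) - 1) = ((i - 1 : Nat) : Int) := by omega
            rw [h1, PySem.List.pyGet?_natCast, PySem.List.pyGet?_natCast, htb']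
            rw [List.getElem?_set_ne (by omega)]
          rw [this]
      calc (j :: l).foldl (pvInnerBody digits (i : Int)) tb
          = l.foldl (pvInnerBody digits (i : Int)) tb' := by rw [List.foldl_cons, hstep]
        _ = tb'.set i (l.foldl (pvG ((PySem.List.pyGet? tb' ((i:Int)-1)).getD []) (i:Int)
              ((PySem.List.pyGet? digits (i:Int)).getD 0)) tb'[i]) := ih tb' hlen'
        _ = _ := by rw [hGeq, hrow', htb', List.set_set, List.foldl_cons]

-- evaluating the row fold: it produces exactly the accumulator step row
lemma pvRowFold (i : Nat) (d : Int) (prev : List Int) (hp : prev.length = 10)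
    (h0 : i = 0 → prev = List.replicate 10 0) :
    (PySem.List.pyRange 0 10 1).foldl (pvG prev (i:Int) d) (List.replicate 10 0)
      = pvStepRow prev d i := by
  have hrg : PySem.List.pyRange 0 10 1 = [0,1,2,3,4,5,6,7,8,9] := by decide
  rw [hrg]
  by_cases h0 : i = 0
  · subst h0
    rw [h0 rfl]
    by_cases hd : 0 ≤ d ∧ d < 10
    · obtain ⟨h1, h2⟩ := hd
      interval_cases d <;> decide
    · have w1 : (0:Int) ≠ d := by omega
      have w2 : (1:Int) ≠ d := by omega
      have w3 : (2:Int) ≠ d := by omega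
      have w4 : (3:Int) ≠ d := by omega
      have w5 : (4:Int) ≠ d := by omega
      have w6 : (5:Int) ≠ d := by omega
      have w7 : (6:Int) ≠ d := by omega
      have w8 : (7:Int) ≠ d := by omega
      have w9 : (8:Int) ≠ d := by omega
      have w10 : (9:Int) ≠ d := by omega
      simp [pvG, pvStepRow, hd, w1, w2, w3, w4, w5, w6, w7, w8, w9, w10]
  · have hz : ¬((i:Int) = 0) := by omega
    have hpp : (0:Int) < (i:Int) := by omega
    have hlit : prev = [prev[0], prev[1], prev[2], prev[3], prev[4],
        prev[5], prev[6], prev[7], prev[8], prev[9]] := by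
      apply List.ext_getElem (by simp [hp])
      intro k hk1 hk2
      simp [hp] at hk1
      interval_cases k <;> rfl
    rw [hlit]
    by_cases hd : 0 ≤ d ∧ d < 10
    · obtain ⟨h1, h2⟩ := hd
      interval_cases d <;>
        simp [pvG, pvStepRow, h0, (by omega : 0 < i), PySem.List.pyGet?, PySem.List.pyIdx?]
    · have w1 : (0:Int) ≠ d := by omega
      have w2 : (1:Int) ≠ d := by omega
      have w3 : (2:Int) ≠ d := by omega
      have w4 : (3:Int) ≠ d := by omega
      have w5 : (4:Int) ≠ d := by omega
      have w6 : (5:Int) ≠ d := by omega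
      have w7 : (6:Int) ≠ d := by omega
      have w8 : (7:Int) ≠ d := by omega
      have w9 : (9:Int) ≠ d := by omega
      have w10 : (8:Int) ≠ d := by omega
      simp [pvG, pvStepRow, hd, (by omega : 0 < i), w1, w2, w3, w4, w5, w6, w7, w8, w9, w10,
        PySem.List.pyGet?, PySem.List.pyIdx?]

-- main outer induction for A: after m outer steps the first m rows are the accumulator snapshots
lemma pvOuter (digits : List Int) (m : Nat) (hm : m ≤ digits.length) :
    (PySem.List.pyRange 0 (m : Int) 1).foldl
        (fun tb i => (PySem.List.pyRange 0 10 1).foldl (pvInnerBody digits i) tb)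
        ((PySem.List.pyRange 0 (digits.length : Int) 1).map
          (fun _ => (PySem.List.pyRange 0 10 1).map (fun _ => (0:Int))))
      = (List.range m).map (fun k => pvCurAt digits (k+1))
          ++ List.replicate (digits.length - m) (List.replicate 10 0) := by
  have hzrow : (PySem.List.pyRange 0 10 1).map (fun _ => (0:Int)) = List.replicate 10 0 := by
    decide
  have htab0 : (PySem.List.pyRange 0 (digits.length : Int) 1).map
      (fun _ => (PySem.List.pyRange 0 10 1).map (fun _ => (0:Int)))
      = List.replicate digits.length (List.replicate 10 0) := by
    rw [List.eq_replicate_iff]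
    constructor
    · simp [PySem.List.length_pyRange_one]
    · intro r hr
      obtain ⟨x, _, hx⟩ := List.mem_map.mp hr
      rw [← hx, hzrow]
  induction m with
  | zero =>
      simp [PySem.List.pyRange_zero_nat, Function.comp_def, List.map_const']
  | succ m ih =>
      have hm' : m ≤ digits.length := by omega
      have hmlt : m < digits.length := by omega
      have hsplit : PySem.List.pyRange 0 ((m+1 : Nat) : Int) 1
          = PySem.List.pyRange 0 (m : Int) 1 ++ [(m : Int)] := by
        push_cast
        exact PySem.List.pyRange_one_succ_right (by omega)
      rw [hsplit, List.foldl_append, ih hm']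
      set tb := (List.range m).map (fun k => pvCurAt digits (k+1))
          ++ List.replicate (digits.length - m) (List.replicate 10 0) with htb
      have hlen : tb.length = digits.length := by
        simp [htb]; omega
      have hi : m < tb.length := by omega
      have hrowm : tb[m]'hi = List.replicate 10 0 := by
        rw [List.getElem_eq_iff]
        rw [htb, List.getElem?_append_right (by simp)]
        simp only [List.length_map, List.length_range, List.getElem?_replicate]
        rw [if_pos (by omega)]
      have hprev : (PySem.List.pyGet? tb ((m:Int) - 1)).getD [] = pvCurAt digits m := by
        by_cases h0 : m = 0
        · subst h0
          have : PySem.List.pyGet? tb (-1) = tb.getLast? := PySem.List.pyGet?_neg_one tb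
          rw [show ((0:Nat):Int) - 1 = -1 by omega, this, htb]
          have hpos : 0 < digits.length - 0 := by omega
          have hne : ¬ digits = [] := by
            intro h; subst h; simp at hmlt
          simp [List.getLast?_replicate, pvCurAt, hne]
        · have hcast : ((m:Int) - 1) = (((m-1 : Nat)) : Int) := by omega
          rw [hcast, PySem.List.pyGet?_natCast, htb]
          rw [List.getElem?_append_left (by simp; omega)]
          simp only [List.getElem?_map]
          rw [List.getElem?_range (by omega)]
          simp only [Option.map_some, Option.getD_some]
          congr 1
          omega
      have hfold := pvLift digits (PySem.List.pyRange 0 10 1) tb m hi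
      simp only [List.foldl_cons, List.foldl_nil]
      rw [hfold]
      rw [hprev, hrowm]
      rw [pvRowFold m ((PySem.List.pyGet? digits (m:Int)).getD 0) (pvCurAt digits m)
        (pvCurAt_length digits m) (by intro h0; subst h0; rfl)]
      have hstep : pvStepRow (pvCurAt digits m) ((PySem.List.pyGet? digits (m:Int)).getD 0) m
          = pvCurAt digits (m+1) := rfl
      rw [hstep, htb]
      rw [List.set_append]
      simp only [List.length_map, List.length_range]
      rw [if_neg (by omega), Nat.sub_self]
      have hrep : (List.replicate (digits.length - m) (List.replicate 10 (0:Int))).set 0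
          (pvCurAt digits (m+1))
          = pvCurAt digits (m+1) :: List.replicate (digits.length - (m+1)) (List.replicate 10 0) := by
        have : digits.length - m = (digits.length - (m+1)) + 1 := by omega
        rw [this, List.replicate_succ, List.set_cons_zero]
      rw [hrep, List.range_succ, List.map_append]
      simp

-- B's mask fold computes the full accumulator (bit carries 2^position)
lemma pvMaskFold (digits : List Int) :
    ∀ (suf pre : List Int), digits = pre ++ suf →
      suf.foldl pvMaskStep (pvCurAt digits pre.length, (2:Int) ^ pre.length)
        = (pvCurAt digits digits.length, 2 ^ digits.length) := by
  intro suf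
  induction suf with
  | nil => intro pre h; simp [h]
  | cons d rest ih =>
      intro pre h
      have hget : PySem.List.pyGet? digits (pre.length : Int) = some d := by
        rw [h]; exact PySem.List.pyGet?_append_length pre rest d
      have hshift : ((2:Int) ^ pre.length) <<< (1:Nat) = 2 ^ (pre.length + 1) := by
        rw [Int.shiftLeft_eq, ← pow_add]
      have hstep : pvMaskStep (pvCurAt digits pre.length, (2:Int) ^ pre.length) d
          = (pvCurAt digits (pre.length + 1), 2 ^ (pre.length + 1)) := by
        simp only [pvMaskStep, hshift]
        refine Prod.ext ?_ rfl
        show _ = pvCurAt digits (pre.length + 1)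
        simp [pvCurAt, pvStepRow, hget]
      have ih' := ih (pre ++ [d]) (by simpa using h)
      simp only [List.length_append, List.length_singleton] at ih'
      rw [List.foldl_cons, hstep]
      exact ih'

-- B's row fold builds one truncated row per position (low carries 2^(row+1) - 1)
lemma pvRowFoldB (masks : List Int) (xs : List Int) :
    ∀ (k : Nat) (acc : List (List Int)),
      xs.foldl (pvRowStep masks) (acc, (2:Int) ^ (k+1) - 1)
        = (acc ++ (List.range xs.length).map
            (fun t => masks.map (fun m => PySem.Int.band m ((2:Int) ^ (k+t+1) - 1))),
           2 ^ (k + xs.length + 1) - 1) := by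
  induction xs with
  | nil => intro k acc; simp
  | cons x rest ih =>
      intro k acc
      have hlow : 2 * ((2:Int) ^ (k+1) - 1) + 1 = 2 ^ (k+1+1) - 1 := by ring
      rw [List.foldl_cons]
      show rest.foldl (pvRowStep masks)
          (acc ++ [masks.map (fun m => PySem.Int.band m ((2:Int) ^ (k+1) - 1))],
           2 * ((2:Int) ^ (k+1) - 1) + 1) = _
      rw [hlow, ih (k+1)]
      refine Prod.ext ?_ ?_
      · show (acc ++ [masks.map (fun m => PySem.Int.band m ((2:Int) ^ (k+1) - 1))]) ++ _ = _
        rw [List.append_assoc, List.singleton_append]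
        congr 1
        rw [List.length_cons, List.range_succ_eq_map, List.map_cons, List.map_map]
        congr 1
        apply List.map_congr_left
        intro t _
        simp only [Function.comp, Nat.succ_eq_add_one]
        have h : k + 1 + t + 1 = k + (t + 1) + 1 := by omega
        rw [h]
      · show (2:Int) ^ (k+1+rest.length+1) - 1 = 2 ^ (k + (x :: rest).length + 1) - 1
        congr 2
        simp
        omega

-- the row fold as Source B starts it, low = 1
lemma pvRowsTop (masks : List Int) (xs : List Int) :
    (xs.foldl (pvRowStep masks) ([], 1)).1
      = (List.range xs.length).map
          (fun t => masks.map (fun m => PySem.Int.band m ((2:Int) ^ (t+1) - 1))) := by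
  have h := pvRowFoldB masks xs 0 []
  rw [show ((2:Int) ^ (0+1) - 1) = 1 by norm_num] at h
  rw [h]
  simp only [List.nil_append]
  apply List.map_congr_left
  intro t _
  have h0 : 0 + t + 1 = t + 1 := by omega
  rw [h0]

-- masking with 2^t - 1 is mod 2^t on nonnegative ints
lemma pvBandPow (x : Int) (t : Nat) (hx : 0 ≤ x) :
    PySem.Int.band x ((2:Int) ^ t - 1) = x % 2 ^ t := by
  have h1 : (1:Nat) ≤ 2 ^ t := Nat.one_le_two_pow
  have hc : ((2:Int) ^ t - 1) = (((2 ^ t - 1 : Nat)) : Int) := by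
    push_cast [h1]; ring
  have hx' : x = ((x.toNat : Nat) : Int) := by omega
  rw [hc]
  conv_lhs => rw [hx']
  rw [PySem.Int.band_natCast, Nat.and_two_pow_sub_one_eq_mod]
  conv_rhs => rw [hx']
  push_cast
  rfl

-- one accumulator step, entrywise
lemma pvE_succ (digits : List Int) (m j : Nat) :
    pvE digits (m+1) j
      = pvE digits m j
        + (if 0 ≤ (PySem.List.pyGet? digits (m:Int)).getD 0
             ∧ (PySem.List.pyGet? digits (m:Int)).getD 0 < 10
             ∧ ((PySem.List.pyGet? digits (m:Int)).getD 0).toNat = j then 2 ^ m else 0) := by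
  set d := (PySem.List.pyGet? digits (m:Int)).getD 0 with hd
  have hlen := pvCurAt_length digits m
  unfold pvE
  show ((pvStepRow (pvCurAt digits m) d m)[j]?).getD 0 = _
  unfold pvStepRow
  by_cases hg : 0 ≤ d ∧ d < 10
  · obtain ⟨h1, h2⟩ := hg
    have hdn : d.toNat < (pvCurAt digits m).length := by rw [hlen]; omega
    have hget : PySem.List.pyGet? (pvCurAt digits m) d
        = some ((pvCurAt digits m)[d.toNat]'hdn) := by
      have hcast : d = ((d.toNat : Nat) : Int) := by omega
      conv_lhs => rw [hcast]
      rw [PySem.List.pyGet?_natCast, List.getElem?_eq_getElem hdn]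
    rw [if_pos ⟨h1, h2⟩, hget]
    by_cases hj : d.toNat = j
    · subst hj
      rw [List.getElem?_set_self (by omega)]
      simp [h1, h2, List.getElem?_eq_getElem hdn]
    · rw [List.getElem?_set_ne hj]
      simp [hj, h1, h2]
  · rw [if_neg hg]
    have : ¬(0 ≤ d ∧ d < 10 ∧ d.toNat = j) := fun ⟨a, b, _⟩ => hg ⟨a, b⟩
    simp [this]

lemma pvE_bounds (digits : List Int) (m j : Nat) :
    0 ≤ pvE digits m j ∧ pvE digits m j < 2 ^ m := by
  induction m with
  | zero =>
      unfold pvE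
      simp only [pvCurAt, List.getElem?_replicate]
      split_ifs <;> simp
  | succ m ih =>
      rw [pvE_succ]
      have h2 : (2:Int) ^ (m+1) = 2 ^ m + 2 ^ m := by ring
      split_ifs <;> omega

-- entries stabilise modulo 2^t once m ≥ t
lemma pvE_mod_stable (digits : List Int) (t m j : Nat) (ht : t ≤ m) :
    pvE digits m j % (2 ^ t : Int) = pvE digits t j % 2 ^ t := by
  induction m with
  | zero => obtain rfl : t = 0 := by omega
            rfl
  | succ m ih =>
      by_cases he : t = m + 1
      · subst he; rfl
      · have htm : t ≤ m := by omega
        rw [pvE_succ]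
        have hdvd : (2:Int) ^ m = 2 ^ t * 2 ^ (m - t) := by
          rw [← pow_add]; congr 1; omega
        split_ifs
        · rw [hdvd, Int.add_mul_emod_self_left, ih htm]
        · rw [add_zero, ih htm]

-- a full-accumulator entry mod 2^(k+1) is the (k+1)-snapshot entry
lemma pvE_mod (digits : List Int) (k j : Nat) (hk : k < digits.length) :
    pvE digits digits.length j % (2 ^ (k+1) : Int) = pvE digits (k+1) j := by
  rw [pvE_mod_stable digits (k+1) digits.length j (by omega)]
  have hb := pvE_bounds digits (k+1) j
  exact Int.emod_emod_of_dvd _ dvd_rfl ▸ Int.emod_eq_of_lt hb.1 hb.2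

-- row k+1 of B equals the accumulator snapshot
lemma pvRowMod (digits : List Int) (k : Nat) (hk : k < digits.length) :
    (pvCurAt digits digits.length).map
        (fun m => PySem.Int.band m ((2:Int) ^ (k+1) - 1))
      = pvCurAt digits (k+1) := by
  apply List.ext_getElem
  · simp [pvCurAt_length]
  · intro j hj1 hj2
    simp only [List.length_map, pvCurAt_length] at hj1
    rw [List.getElem_map]
    have h1 : (pvCurAt digits digits.length)[j]'(by rw [pvCurAt_length]; exact hj1)
        = pvE digits digits.length j := by
      simp [pvE, List.getElem?_eq_getElem (by rw [pvCurAt_length]; exact hj1 :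
        j < (pvCurAt digits digits.length).length)]
    have h2 : (pvCurAt digits (k+1))[j]'(by rw [pvCurAt_length]; exact hj1)
        = pvE digits (k+1) j := by
      simp [pvE, List.getElem?_eq_getElem (by rw [pvCurAt_length]; exact hj1 :
        j < (pvCurAt digits (k+1)).length)]
    rw [h1, h2]
    rw [pvBandPow _ _ (pvE_bounds digits digits.length j).1]
    exact pvE_mod digits k j hk

-- ===== VERDICT (by name: the statement is the Claim_ definition above) =====
theorem oneDigitTable_spec : Claim_equal_oneDigitTable := by
  intro digits _
  unfold Spec_oneDigitTable oneDigitTable oneDigitTable_alt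
  have hA := pvOuter digits digits.length le_rfl
  simp only [Nat.sub_self, List.replicate_zero, List.append_nil] at hA
  rw [hA]
  have hmask : (digits.foldl pvMaskStep (List.replicate 10 0, 1)).1
      = pvCurAt digits digits.length := by
    have h := pvMaskFold digits digits [] (by simp)
    simp only [List.length_nil, pow_zero] at h
    have h0 : pvCurAt digits 0 = List.replicate 10 0 := rfl
    rw [h0] at h
    rw [h]
  rw [hmask, pvRowsTop]
  apply List.map_congr_left
  intro k hk
  rw [List.mem_range] at hk
  exact (pvRowMod digits k hk).symm
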